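-- pv_equiv track=rewrite | github.com/killianmarty/Labo_IA | Labo2/PartieB/player.py | couldMatch
-- ===== SOURCE A (Python) =====
-- def couldMatch(sentence, guess):
--
--     knowledgeCombination = sentence[0]
--     knowledgeFeedback = sentence[1]
--
--
--     colors = [0, 0, 0, 0, 0, 0]
--     for i in range(4):
--         colors[knowledgeCombination[i]] += 1
--
--     correct = 0
--     for i in range(4):
--         if(colors[guess[i]]!=0):
--             correct += 1
--             colors[guess[i]] -= 1
--
--
--     a = 0
--     for i in range(4):
--         if(correct != 0 and knowledgeCombination[i] == guess[i]):
--             a += 1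
--
--     b = correct - a
--
--     return (a == knowledgeFeedback[0] and b == knowledgeFeedback[1])
-- ===== SOURCE B (Python) =====
-- def couldMatch(sentence, guess):
--     knowledgeCombination = sentence[0]
--     knowledgeFeedback = sentence[1]
--
--     # black pegs: positions that match exactly
--     a = 0
--     for i in range(4):
--         if knowledgeCombination[i] == guess[i]:
--             a += 1
--
--     # per-color frequency tables (fixed size 6, like the game's color count)
--     secret = [0, 0, 0, 0, 0, 0]
--     mine = [0, 0, 0, 0, 0, 0]
--     for i in range(4):
--         secret[knowledgeCombination[i]] += 1
--         mine[guess[i]] += 1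
--
--     # total color overlap; white pegs are the overlap minus the black pegs
--     total = 0
--     for s, m in zip(secret, mine):
--         total += min(s, m)
--     b = total - a
--
--     return (a == knowledgeFeedback[0] and b == knowledgeFeedback[1])
-- ===== Notes on version B (the rewrite author's own statement) =====
-- stated objective: simpler
-- what changed: A's stateful greedy pass that decrements a shared colors table while counting, plus a guarded positional pass, is replaced by a direct decomposition: black pegs counted as positional equalities, two independent frequency tables, and the white pegs obtained as sum-of-min color overlap minus the black pegs.
-- outside the precondition, e.g. on couldMatch(([0, 1, 2, 3], [5]), [4, 4, 4, 4]): A returns False, B returns False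
import Mathlib
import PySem

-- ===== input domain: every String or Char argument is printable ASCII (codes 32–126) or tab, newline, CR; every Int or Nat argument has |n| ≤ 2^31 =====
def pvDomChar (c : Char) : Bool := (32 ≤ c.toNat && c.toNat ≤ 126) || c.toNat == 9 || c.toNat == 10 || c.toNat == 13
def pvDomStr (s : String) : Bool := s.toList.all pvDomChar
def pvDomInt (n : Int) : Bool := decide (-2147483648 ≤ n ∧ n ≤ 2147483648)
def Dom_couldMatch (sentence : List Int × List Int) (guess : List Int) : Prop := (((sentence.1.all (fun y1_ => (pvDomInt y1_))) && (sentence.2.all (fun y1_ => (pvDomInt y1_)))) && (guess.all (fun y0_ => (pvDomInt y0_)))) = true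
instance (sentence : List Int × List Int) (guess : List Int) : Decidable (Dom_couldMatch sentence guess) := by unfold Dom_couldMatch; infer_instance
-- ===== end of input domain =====

-- B replaces A's stateful greedy decrement loop by black pegs counted directly plus two
-- frequency tables combined with a min-sum (simpler decomposition, same exact values).

-- ===== PORT A =====
def couldMatch (sentence : List Int × List Int) (guess : List Int) : Bool :=
  let knowledgeCombination := sentence.1
  let knowledgeFeedback := sentence.2
  let colors : List Int := [0, 0, 0, 0, 0, 0]
  let colors := (PySem.List.pyRange 0 4 1).foldl (fun cs i =>
    PySem.List.pySetD cs (PySem.List.pyGetD knowledgeCombination i 0)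
      (PySem.List.pyGetD cs (PySem.List.pyGetD knowledgeCombination i 0) 0 + 1)) colors
  let p := (PySem.List.pyRange 0 4 1).foldl (fun (p : Int × List Int) i =>
    if PySem.List.pyGetD p.2 (PySem.List.pyGetD guess i 0) 0 ≠ 0 then
      (p.1 + 1, PySem.List.pySetD p.2 (PySem.List.pyGetD guess i 0)
        (PySem.List.pyGetD p.2 (PySem.List.pyGetD guess i 0) 0 - 1))
    else p) ((0 : Int), colors)
  let correct := p.1
  let a := (PySem.List.pyRange 0 4 1).foldl (fun a i =>
    if correct ≠ 0 ∧ PySem.List.pyGetD knowledgeCombination i 0 = PySem.List.pyGetD guess i 0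
    then a + 1 else a) (0 : Int)
  let b := correct - a
  decide (a = PySem.List.pyGetD knowledgeFeedback 0 0) && decide (b = PySem.List.pyGetD knowledgeFeedback 1 0)

-- ===== PORT B =====
def couldMatch_alt (sentence : List Int × List Int) (guess : List Int) : Bool :=
  let knowledgeCombination := sentence.1
  let knowledgeFeedback := sentence.2
  let a := (PySem.List.pyRange 0 4 1).foldl (fun a i =>
    if PySem.List.pyGetD knowledgeCombination i 0 = PySem.List.pyGetD guess i 0
    then a + 1 else a) (0 : Int)
  let tabs := (PySem.List.pyRange 0 4 1).foldl (fun (t : List Int × List Int) i =>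
    (PySem.List.pySetD t.1 (PySem.List.pyGetD knowledgeCombination i 0)
       (PySem.List.pyGetD t.1 (PySem.List.pyGetD knowledgeCombination i 0) 0 + 1),
     PySem.List.pySetD t.2 (PySem.List.pyGetD guess i 0)
       (PySem.List.pyGetD t.2 (PySem.List.pyGetD guess i 0) 0 + 1)))
    (([0, 0, 0, 0, 0, 0] : List Int), ([0, 0, 0, 0, 0, 0] : List Int))
  let total := (tabs.1.zip tabs.2).foldl (fun t sm => t + min sm.1 sm.2) (0 : Int)
  let b := total - a
  decide (a = PySem.List.pyGetD knowledgeFeedback 0 0) && decide (b = PySem.List.pyGetD knowledgeFeedback 1 0)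

-- ===== PRECONDITION & SPEC =====
-- Pre_ excludes exactly the inputs where A's indexing raises: lists shorter than the 4 pegs /
-- 2 feedback numbers, and colors outside Python's valid index range [-6,5] for the length-6
-- colors table.  (A feedback list of length 1 raises IndexError whenever the computed black-peg
-- count equals feedback[0]; since whether it raises depends on the computed value, those inputs
-- are excluded wholesale even though A returns False on the mismatching ones — B returns the
-- same False there.)
def Pre_couldMatch (sentence : List Int × List Int) (guess : List Int) : Prop :=
  4 ≤ sentence.1.length ∧ 4 ≤ guess.length ∧ 2 ≤ sentence.2.length ∧
  (∀ x ∈ sentence.1.take 4, -6 ≤ x ∧ x < 6) ∧ (∀ x ∈ guess.take 4, -6 ≤ x ∧ x < 6)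
instance (sentence : List Int × List Int) (guess : List Int) : Decidable (Pre_couldMatch sentence guess) := by unfold Pre_couldMatch; infer_instance

def pvWitness_couldMatch : (List Int × List Int) × List Int := (([0, 1, 2, 3], [4, 0]), [0, 1, 2, 3])

def Spec_couldMatch (sentence : List Int × List Int) (guess : List Int) (out : Bool) : Prop := out = couldMatch_alt sentence guess
instance (sentence : List Int × List Int) (guess : List Int) (out : Bool) : Decidable (Spec_couldMatch sentence guess out) := by unfold Spec_couldMatch; infer_instance

-- ===== CLAIM (what is proved, stated in full; the proofs are below) =====
def Claim_equal_couldMatch : Prop := ∀ (sentence : List Int × List Int) (guess : List Int), Dom_couldMatch sentence guess → Pre_couldMatch sentence guess → Spec_couldMatch sentence guess (couldMatch sentence guess)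

-- ===== LEMMAS AND PROOFS =====

-- Python's list index for the length-6 colors table: -6 ≤ c < 6 denotes position c (or c+6 if negative).
def nidx (c : Int) : Nat := (if c < 0 then c + 6 else c).toNat

-- count-table increment / greedy decrement step, on Nat indices
def incr (cs : List Int) (j : Nat) : List Int := cs.set j (cs.getD j 0 + 1)
def gstep (p : Int × List Int) (j : Nat) : Int × List Int :=
  if p.2.getD j 0 ≠ 0 then (p.1 + 1, p.2.set j (p.2.getD j 0 - 1)) else p

theorem list4 {α : Type} (xs : List α) (h : 4 ≤ xs.length) :
    ∃ a b c d r, xs = a :: b :: c :: d :: r := by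
  rcases xs with _ | ⟨a, xs⟩; · simp at h
  rcases xs with _ | ⟨b, xs⟩; · simp at h
  rcases xs with _ | ⟨c, xs⟩; · simp at h
  rcases xs with _ | ⟨d, r⟩; · simp at h
  exact ⟨a, b, c, d, r, rfl⟩

theorem list2 {α : Type} (xs : List α) (h : 2 ≤ xs.length) :
    ∃ a b r, xs = a :: b :: r := by
  rcases xs with _ | ⟨a, xs⟩; · simp at h
  rcases xs with _ | ⟨b, r⟩; · simp at h
  exact ⟨a, b, r, rfl⟩

theorem pyGetD_nidx (cs : List Int) (c : Int) (d : Int) (hL : cs.length = 6)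
    (h1 : -6 ≤ c) (h2 : c < 6) : PySem.List.pyGetD cs c d = cs.getD (nidx c) d := by
  simp [PySem.List.pyGetD, PySem.List.pyGet?, PySem.List.pyIdx?, nidx, hL]
  split_ifs <;> simp_all <;> (try congr 1) <;> omega

theorem pySetD_nidx (cs : List Int) (c : Int) (v : Int) (hL : cs.length = 6)
    (h1 : -6 ≤ c) (h2 : c < 6) : PySem.List.pySetD cs c v = cs.set (nidx c) v := by
  simp [PySem.List.pySetD, PySem.List.pySet?, PySem.List.pyIdx?, nidx, hL]
  split_ifs <;> simp_all <;> (try congr 1) <;> omega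

theorem nidx_lt (c : Int) (h1 : -6 ≤ c) (h2 : c < 6) : nidx c < 6 := by
  simp [nidx]; split_ifs <;> omega

theorem getD_set_self (cs : List Int) (j : Nat) (v : Int) (h : j < cs.length) :
    (cs.set j v).getD j 0 = v := by
  simp [List.getD_eq_getElem?_getD, h]

theorem getD_set_ne (cs : List Int) (j j' : Nat) (v : Int) (h : j ≠ j') :
    (cs.set j v).getD j' 0 = cs.getD j' 0 := by
  simp [List.getD_eq_getElem?_getD, List.getElem?_set_ne h]

-- A's first loop (and B's table loop components), moved to Nat indices
theorem loop1_conv (xs : List Int) : ∀ (cs : List Int), cs.length = 6 →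
    (∀ x ∈ xs, -6 ≤ x ∧ x < 6) →
    xs.foldl (fun cs c => PySem.List.pySetD cs c (PySem.List.pyGetD cs c 0 + 1)) cs
      = (xs.map nidx).foldl incr cs := by
  induction xs with
  | nil => intro cs _ _; rfl
  | cons x tl ih =>
    intro cs hL hb
    obtain ⟨hx, hbtl⟩ : (-6 ≤ x ∧ x < 6) ∧ ∀ y ∈ tl, -6 ≤ y ∧ y < 6 := by
      constructor
      · exact hb x (by simp)
      · intro y hy; exact hb y (by simp [hy])
    rw [List.map_cons, List.foldl_cons, List.foldl_cons,
      pySetD_nidx cs x _ hL hx.1 hx.2, pyGetD_nidx cs x 0 hL hx.1 hx.2]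
    exact ih (incr cs (nidx x)) (by simp [incr, hL]) hbtl

-- A's second loop, moved to Nat indices
theorem loop2_conv (xs : List Int) : ∀ (p : Int × List Int), p.2.length = 6 →
    (∀ x ∈ xs, -6 ≤ x ∧ x < 6) →
    xs.foldl (fun p g => if PySem.List.pyGetD p.2 g 0 ≠ 0 then
        (p.1 + 1, PySem.List.pySetD p.2 g (PySem.List.pyGetD p.2 g 0 - 1)) else p) p
      = (xs.map nidx).foldl gstep p := by
  induction xs with
  | nil => intro p _ _; rfl
  | cons x tl ih =>
    intro p hL hb
    obtain ⟨hx, hbtl⟩ : (-6 ≤ x ∧ x < 6) ∧ ∀ y ∈ tl, -6 ≤ y ∧ y < 6 := by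
      constructor
      · exact hb x (by simp)
      · intro y hy; exact hb y (by simp [hy])
    rw [List.map_cons, List.foldl_cons, List.foldl_cons]
    have hstep : (if PySem.List.pyGetD p.2 x 0 ≠ 0 then
        (p.1 + 1, PySem.List.pySetD p.2 x (PySem.List.pyGetD p.2 x 0 - 1)) else p)
        = gstep p (nidx x) := by
      rw [pyGetD_nidx p.2 x 0 hL hx.1 hx.2, pySetD_nidx p.2 x _ hL hx.1 hx.2]; rfl
    rw [hstep]
    refine ih _ ?_ hbtl
    simp [gstep]; split_ifs <;> simp [hL]

theorem length_foldl_incr (ns : List Nat) : ∀ (cs : List Int),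
    ((ns.foldl incr cs)).length = cs.length := by
  induction ns with
  | nil => intro cs; rfl
  | cons n tl ih => intro cs; rw [List.foldl_cons, ih]; simp [incr]

-- the count table really holds counts
theorem counts_getD (ns : List Nat) : ∀ (cs : List Int) (j : Nat),
    (∀ i ∈ ns, i < cs.length) →
    (ns.foldl incr cs).getD j 0 = cs.getD j 0 + (ns.count j : Int) := by
  induction ns with
  | nil => intro cs j _; simp
  | cons n tl ih =>
    intro cs j h
    have hn : n < cs.length := h n (by simp)
    rw [List.foldl_cons, ih (incr cs n) j (by intro i hi; simpa [incr] using h i (by simp [hi])),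
      List.count_cons]
    by_cases hj : j = n
    · subst hj
      rw [show incr cs j = cs.set j (cs.getD j 0 + 1) from rfl, getD_set_self cs j _ hn]
      simp
      omega
    · rw [show incr cs n = cs.set n (cs.getD n 0 + 1) from rfl,
        getD_set_ne cs n j _ (by omega)]
      simp [show ¬n = j by omega]

-- A's greedy pass counts exactly the min-overlap
theorem greedy_correct (ms : List Nat) : ∀ (cs : List Int) (k : Int),
    (∀ i ∈ ms, i < cs.length) → (∀ j, 0 ≤ cs.getD j 0) →
    (ms.foldl gstep (k, cs)).1
      = k + ∑ j ∈ Finset.range cs.length, min (cs.getD j 0) (ms.count j : Int) := by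
  induction ms with
  | nil =>
    intro cs k _ hnn
    rw [List.foldl_nil]
    have : ∑ j ∈ Finset.range cs.length, min (cs.getD j 0) (([] : List Nat).count j : Int) = 0 := by
      apply Finset.sum_eq_zero; intro j _
      have := hnn j
      simp only [List.count_nil, Nat.cast_zero]
      omega
    rw [this]; ring
  | cons m tl ih =>
    intro cs k h hnn
    have hm : m < cs.length := h m (by simp)
    have htl : ∀ i ∈ tl, i < cs.length := fun i hi => h i (by simp [hi])
    rw [List.foldl_cons]
    by_cases h0 : cs.getD m 0 = 0
    · have : gstep (k, cs) m = (k, cs) := by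
        simp only [gstep]; rw [h0]; simp
      rw [this, ih cs k htl hnn]
      congr 1
      apply Finset.sum_congr rfl
      intro j hj
      rw [List.count_cons]
      by_cases hjm : j = m
      · subst hjm; rw [h0]; simp; omega
      · simp only [beq_iff_eq]
        rw [if_neg (show ¬m = j from fun e => hjm e.symm)]; omega
    · have hv : 1 ≤ cs.getD m 0 := by have := hnn m; omega
      set cs' := cs.set m (cs.getD m 0 - 1) with hcs'
      have hstep : gstep (k, cs) m = (k + 1, cs') := by
        simp only [gstep]; rw [if_pos h0]
      have hlen' : cs'.length = cs.length := by simp [hcs']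
      have hnn' : ∀ j, 0 ≤ cs'.getD j 0 := by
        intro j
        by_cases hjm : j = m
        · subst hjm; rw [hcs', getD_set_self cs j _ hm]; omega
        · rw [hcs', getD_set_ne cs m j _ (fun e => hjm e.symm)]; exact hnn j
      rw [hstep, ih cs' (k+1) (by rw [hlen']; exact htl) hnn', hlen']
      have hmem : m ∈ Finset.range cs.length := Finset.mem_range.mpr hm
      rw [← Finset.add_sum_erase _ _ hmem, ← Finset.add_sum_erase _ _ hmem]
      have herase : ∑ j ∈ (Finset.range cs.length).erase m, min (cs'.getD j 0) (tl.count j : Int)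
          = ∑ j ∈ (Finset.range cs.length).erase m, min (cs.getD j 0) ((m :: tl).count j : Int) := by
        apply Finset.sum_congr rfl
        intro j hj
        have hjm : j ≠ m := (Finset.mem_erase.mp hj).1
        rw [hcs', getD_set_ne cs m j _ (fun e => hjm e.symm), List.count_cons]
        simp only [beq_iff_eq]
        rw [if_neg (show ¬m = j from fun e => hjm e.symm)]
        omega
      rw [herase]
      have h1 : cs'.getD m 0 = cs.getD m 0 - 1 := by rw [hcs', getD_set_self cs m _ hm]
      have h2 : ((m :: tl).count m : Int) = (tl.count m : Int) + 1 := by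
        rw [List.count_cons]; simp
      rw [h1, h2]
      have : (0:Int) ≤ (tl.count m : Int) := by positivity
      omega

-- B's zip/min fold is the min-sum over the 6 colors
theorem zipmin (cs ds : List Int) (h1 : cs.length = 6) (h2 : ds.length = 6) :
    (cs.zip ds).foldl (fun t sm => t + min sm.1 sm.2) (0 : Int)
      = ∑ j ∈ Finset.range 6, min (cs.getD j 0) (ds.getD j 0) := by
  rcases cs with _|⟨a0,_|⟨a1,_|⟨a2,_|⟨a3,_|⟨a4,_|⟨a5,ar⟩⟩⟩⟩⟩⟩ <;> simp at h1
  rcases ds with _|⟨b0,_|⟨b1,_|⟨b2,_|⟨b3,_|⟨b4,_|⟨b5,br⟩⟩⟩⟩⟩⟩ <;> simp at h2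
  subst h1; subst h2
  simp [Finset.sum_range_succ, List.getD]

theorem zeros_getD (j : Nat) : (([0, 0, 0, 0, 0, 0] : List Int)).getD j 0 = 0 := by
  rcases j with _|_|_|_|_|_|j <;> simp [List.getD]

-- if the min-overlap is zero, no color occurs in both lists
theorem no_common (ns ms : List Nat)
    (h : ∑ j ∈ Finset.range 6, min ((ns.count j : Int)) ((ms.count j : Int)) = 0)
    (x : Nat) (hx : x < 6) (hn : x ∈ ns) (hm : x ∈ ms) : False := by
  have hterm : ∀ j ∈ Finset.range 6, (0:Int) ≤ min ((ns.count j : Int)) ((ms.count j : Int)) := by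
    intro j _; omega
  have hzero := (Finset.sum_eq_zero_iff_of_nonneg hterm).mp h x (Finset.mem_range.mpr hx)
  have h1 : 1 ≤ ns.count x := List.one_le_count_iff.mpr hn
  have h2 : 1 ≤ ms.count x := List.one_le_count_iff.mpr hm
  omega


-- index loops rewritten as loops over the fetched values
theorem idx_loop1 (il : List Int) (comb : List Int) (z : List Int) :
    il.foldl (fun cs i => PySem.List.pySetD cs (PySem.List.pyGetD comb i 0)
      (PySem.List.pyGetD cs (PySem.List.pyGetD comb i 0) 0 + 1)) z
    = (il.map (fun i => PySem.List.pyGetD comb i 0)).foldl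
        (fun cs c => PySem.List.pySetD cs c (PySem.List.pyGetD cs c 0 + 1)) z := by
  induction il generalizing z with
  | nil => rfl
  | cons i tl ih => simp only [List.foldl_cons, List.map_cons]; exact ih _

theorem idx_loop2 (il : List Int) (guess : List Int) (p : Int × List Int) :
    il.foldl (fun p i => if PySem.List.pyGetD p.2 (PySem.List.pyGetD guess i 0) 0 ≠ 0 then
        (p.1 + 1, PySem.List.pySetD p.2 (PySem.List.pyGetD guess i 0)
          (PySem.List.pyGetD p.2 (PySem.List.pyGetD guess i 0) 0 - 1))
      else p) p
    = (il.map (fun i => PySem.List.pyGetD guess i 0)).foldl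
        (fun p g => if PySem.List.pyGetD p.2 g 0 ≠ 0 then
          (p.1 + 1, PySem.List.pySetD p.2 g (PySem.List.pyGetD p.2 g 0 - 1)) else p) p := by
  induction il generalizing p with
  | nil => rfl
  | cons i tl ih => simp only [List.foldl_cons, List.map_cons]; exact ih _

-- B's pair-table loop splits into two independent table loops
theorem tab_split (il comb guess : List Int) (z1 z2 : List Int) :
    il.foldl (fun t i =>
      (PySem.List.pySetD t.1 (PySem.List.pyGetD comb i 0)
         (PySem.List.pyGetD t.1 (PySem.List.pyGetD comb i 0) 0 + 1),
       PySem.List.pySetD t.2 (PySem.List.pyGetD guess i 0)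
         (PySem.List.pyGetD t.2 (PySem.List.pyGetD guess i 0) 0 + 1))) (z1, z2)
    = (il.foldl (fun cs i => PySem.List.pySetD cs (PySem.List.pyGetD comb i 0)
         (PySem.List.pyGetD cs (PySem.List.pyGetD comb i 0) 0 + 1)) z1,
       il.foldl (fun cs i => PySem.List.pySetD cs (PySem.List.pyGetD guess i 0)
         (PySem.List.pyGetD cs (PySem.List.pyGetD guess i 0) 0 + 1)) z2) := by
  induction il generalizing z1 z2 with
  | nil => rfl
  | cons i tl ih => simp only [List.foldl_cons]; exact ih _ _

theorem mem_map_nidx_lt (xs : List Int) (hb : ∀ x ∈ xs, -6 ≤ x ∧ x < 6) :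
    ∀ i ∈ xs.map nidx, i < 6 := by
  intro i hi
  obtain ⟨x, hx, rfl⟩ := List.mem_map.mp hi
  exact nidx_lt x (hb x hx).1 (hb x hx).2

-- ===== VERDICT (by name: the statement is the Claim_ definition above) =====
theorem couldMatch_spec : Claim_equal_couldMatch := by
  intro sentence guess _ hpre
  obtain ⟨comb, feed⟩ := sentence
  obtain ⟨hc4, hg4, hf2, hcb, hgb⟩ := hpre
  obtain ⟨c0, c1, c2, c3, cr, rfl⟩ := list4 comb hc4
  obtain ⟨g0, g1, g2, g3, gr, rfl⟩ := list4 guess hg4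
  obtain ⟨f0, f1, fr, rfl⟩ := list2 feed hf2
  simp only [List.take, List.mem_cons, List.not_mem_nil, or_false, forall_eq_or_imp, forall_eq] at hcb hgb
  obtain ⟨hb0, hb1, hb2, hb3⟩ := hcb
  obtain ⟨hd0, hd1, hd2, hd3⟩ := hgb
  unfold Spec_couldMatch
  simp only [couldMatch, couldMatch_alt]
  rw [idx_loop1, idx_loop2]
  rw [show PySem.List.pyRange 0 4 1 = [0,1,2,3] from rfl]
  simp only [List.map_cons, List.map_nil, PySem.List.pyGetD_ofNat', List.getD_cons_zero,
    List.getD_cons_succ]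
  rw [tab_split]
  simp only [idx_loop1]
  simp only [List.map_cons, List.map_nil, PySem.List.pyGetD_ofNat', List.getD_cons_zero,
    List.getD_cons_succ]
  have hbc : ∀ x ∈ [c0, c1, c2, c3], -6 ≤ x ∧ x < 6 := by
    intro x hx; simp at hx; rcases hx with rfl | rfl | rfl | rfl <;> assumption
  have hbg : ∀ x ∈ [g0, g1, g2, g3], -6 ≤ x ∧ x < 6 := by
    intro x hx; simp at hx; rcases hx with rfl | rfl | rfl | rfl <;> assumption
  rw [loop1_conv [c0, c1, c2, c3] [0,0,0,0,0,0] rfl hbc,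
      loop1_conv [g0, g1, g2, g3] [0,0,0,0,0,0] rfl hbg,
      loop2_conv [g0, g1, g2, g3] _ (by rw [length_foldl_incr]; rfl) hbg]
  have hlenA : (List.foldl incr [0, 0, 0, 0, 0, 0] (List.map nidx [c0, c1, c2, c3])).length = 6 := by
    rw [length_foldl_incr]; rfl
  have hlenB : (List.foldl incr [0, 0, 0, 0, 0, 0] (List.map nidx [g0, g1, g2, g3])).length = 6 := by
    rw [length_foldl_incr]; rfl
  have hgA : ∀ j, (List.foldl incr [0, 0, 0, 0, 0, 0] (List.map nidx [c0, c1, c2, c3])).getD j 0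
      = (((List.map nidx [c0, c1, c2, c3]).count j : Nat) : Int) := by
    intro j
    rw [counts_getD _ _ j (by intro i hi; exact mem_map_nidx_lt _ hbc i hi), zeros_getD]
    ring
  have hgB : ∀ j, (List.foldl incr [0, 0, 0, 0, 0, 0] (List.map nidx [g0, g1, g2, g3])).getD j 0
      = (((List.map nidx [g0, g1, g2, g3]).count j : Nat) : Int) := by
    intro j
    rw [counts_getD _ _ j (by intro i hi; exact mem_map_nidx_lt _ hbg i hi), zeros_getD]
    ring
  rw [greedy_correct (List.map nidx [g0, g1, g2, g3]) _ 0
      (by intro i hi; rw [hlenA]; exact mem_map_nidx_lt _ hbg i hi)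
      (by intro j; rw [hgA j]; positivity),
    hlenA]
  rw [zipmin _ _ hlenA hlenB]
  have hsumA : ∑ j ∈ Finset.range 6,
      min ((List.foldl incr [0, 0, 0, 0, 0, 0] (List.map nidx [c0, c1, c2, c3])).getD j 0)
        (((List.map nidx [g0, g1, g2, g3]).count j : Nat) : Int)
      = ∑ j ∈ Finset.range 6, min (((List.map nidx [c0, c1, c2, c3]).count j : Nat) : Int)
          (((List.map nidx [g0, g1, g2, g3]).count j : Nat) : Int) :=
    Finset.sum_congr rfl (fun j _ => by rw [hgA j])
  have hsumB : ∑ j ∈ Finset.range 6,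
      min ((List.foldl incr [0, 0, 0, 0, 0, 0] (List.map nidx [c0, c1, c2, c3])).getD j 0)
        ((List.foldl incr [0, 0, 0, 0, 0, 0] (List.map nidx [g0, g1, g2, g3])).getD j 0)
      = ∑ j ∈ Finset.range 6, min (((List.map nidx [c0, c1, c2, c3]).count j : Nat) : Int)
          (((List.map nidx [g0, g1, g2, g3]).count j : Nat) : Int) :=
    Finset.sum_congr rfl (fun j _ => by rw [hgA j, hgB j])
  rw [hsumA, hsumB]
  simp only [zero_add]
  by_cases hT : (∑ j ∈ Finset.range 6,
      min (((List.map nidx [c0, c1, c2, c3]).count j : Nat) : Int)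
        (((List.map nidx [g0, g1, g2, g3]).count j : Nat) : Int)) = 0
  · have hne0 : ¬ c0 = g0 := fun e => no_common _ _ hT (nidx c0) (nidx_lt c0 hb0.1 hb0.2)
      (List.mem_map_of_mem (by simp)) (by rw [e]; exact List.mem_map_of_mem (by simp))
    have hne1 : ¬ c1 = g1 := fun e => no_common _ _ hT (nidx c1) (nidx_lt c1 hb1.1 hb1.2)
      (List.mem_map_of_mem (by simp)) (by rw [e]; exact List.mem_map_of_mem (by simp))
    have hne2 : ¬ c2 = g2 := fun e => no_common _ _ hT (nidx c2) (nidx_lt c2 hb2.1 hb2.2)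
      (List.mem_map_of_mem (by simp)) (by rw [e]; exact List.mem_map_of_mem (by simp))
    have hne3 : ¬ c3 = g3 := fun e => no_common _ _ hT (nidx c3) (nidx_lt c3 hb3.1 hb3.2)
      (List.mem_map_of_mem (by simp)) (by rw [e]; exact List.mem_map_of_mem (by simp))
    simp only [hT]
    simp [List.foldl_cons, List.foldl_nil, PySem.List.pyGetD_ofNat', hne0, hne1, hne2, hne3]
  · simp only [ne_eq, hT, not_false_eq_true, true_and]
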